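-- pv_equiv track=rewrite | github.com/mcosta95/advent-of-code-2024 | days/day_6.py | find_valid_positions
-- ===== SOURCE A (Python) =====
-- def find_valid_positions(dx, dy, start_x, start_y, positions, len_matrix):
--
--     valid_positions = []
--     for px, py in positions:
--         if dy == 0: # moving vertical
--             if py == start_y and ((px - start_x) * dx > 0):
--                 valid_positions.append((px, py))
--
--         elif dx == 0: # moving horizontal
--             if px == start_x and ((py - start_y) * dy > 0):
--                 valid_positions.append((px, py))
--
--     if not valid_positions:
--
--         if dx == 0:
--             new_x = start_x
--             new_y = len_matrix*dy if len_matrix*dy > 0 else 0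
--
--         elif dy == 0:
--             new_x = len_matrix*dx if len_matrix*dx > 0 else 0
--             new_y = start_y
--
--         return False, (new_x, new_y)
--
--     if len(valid_positions) > 1:
--
--         if dx == 0:
--             if dy < 0:
--                 new_x, new_y = max(valid_positions)
--             else:
--                 new_x, new_y = min(valid_positions)
--
--         elif dy == 0:
--             if dx < 0:
--                 new_x, new_y = max(valid_positions)
--             else:
--                 new_x, new_y = min(valid_positions)
--     else:
--         new_x, new_y = valid_positions[0]
--     a=1
--
--     return True, (new_x, new_y)
-- ===== SOURCE B (Python) =====
-- def _nearest(start, d, cands):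
--     # running nearest along one axis: smallest positive offset (c - start) * d
--     best = None
--     for c in cands:
--         if (c - start) * d > 0 and (best is None or (c - start) * d < (best - start) * d):
--             best = c
--     return best
--
--
-- def find_valid_positions(dx, dy, start_x, start_y, positions, len_matrix):
--     if dx == 0:
--         best = _nearest(start_y, dy, (py for px, py in positions if px == start_x))
--         if best is None:
--             edge = len_matrix * dy
--             return False, (start_x, max(edge, 0))
--         return True, (start_x, best)
--     if dy == 0:
--         best = _nearest(start_x, dx, (px for px, py in positions if py == start_y))
--         if best is None:
--             edge = len_matrix * dx
--             return False, (max(edge, 0), start_y)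
--         return True, (best, start_y)
--     raise ValueError("direction must be axis-aligned")
-- ===== Notes on version B (the rewrite author's own statement) =====
-- stated objective: simpler
-- what changed: A collects matching pairs into a list and then branches on its length with lexicographic min/max of tuples; B reduces each axis-aligned ray to one dimension and keeps a single running nearest candidate (smallest positive offset (c-start)*d) in one pass, with no intermediate list and no length/sign branching on pairs.
import Mathlib
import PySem

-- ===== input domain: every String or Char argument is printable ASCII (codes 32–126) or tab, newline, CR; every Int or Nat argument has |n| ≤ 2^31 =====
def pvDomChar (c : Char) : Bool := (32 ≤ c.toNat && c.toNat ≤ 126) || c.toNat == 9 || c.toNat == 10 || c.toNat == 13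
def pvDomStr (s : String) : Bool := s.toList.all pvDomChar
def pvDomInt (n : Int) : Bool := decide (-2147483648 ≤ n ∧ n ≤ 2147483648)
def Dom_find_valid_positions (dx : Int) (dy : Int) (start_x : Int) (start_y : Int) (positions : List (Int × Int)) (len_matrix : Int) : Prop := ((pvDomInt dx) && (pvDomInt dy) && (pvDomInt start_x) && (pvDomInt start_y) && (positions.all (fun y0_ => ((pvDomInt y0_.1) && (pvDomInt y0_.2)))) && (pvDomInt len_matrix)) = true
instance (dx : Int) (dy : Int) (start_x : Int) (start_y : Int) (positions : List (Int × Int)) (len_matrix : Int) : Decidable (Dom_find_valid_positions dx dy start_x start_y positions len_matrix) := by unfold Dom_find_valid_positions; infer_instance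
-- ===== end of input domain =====

-- B replaces A's collect-then-min/max over a list of tuples by a single running-nearest
-- scan along the one varying axis (objective: simpler; same O(n) cost).

-- ===== PORT A =====
def find_valid_positions (dx : Int) (dy : Int) (start_x : Int) (start_y : Int) (positions : List (Int × Int)) (len_matrix : Int) : Bool × (Int × Int) :=
  let valid_positions := positions.foldl (fun acc p =>
    if dy = 0 then
      (if p.2 = start_y ∧ (p.1 - start_x) * dx > 0 then acc ++ [p] else acc)
    else if dx = 0 then
      (if p.1 = start_x ∧ (p.2 - start_y) * dy > 0 then acc ++ [p] else acc)
    else acc) []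
  if valid_positions = [] then
    if dx = 0 then
      (false, (start_x, if len_matrix * dy > 0 then len_matrix * dy else 0))
    else if dy = 0 then
      (false, (if len_matrix * dx > 0 then len_matrix * dx else 0, start_y))
    else
      (false, (0, 0))  -- Python raises NameError here (diagonal ray); excluded by Pre_
  else if valid_positions.length > 1 then
    if dx = 0 then
      (true, (if dy < 0 then PySem.List.max2? valid_positions Prod.fst Prod.snd
              else PySem.List.min2? valid_positions Prod.fst Prod.snd).getD (0, 0))
    else if dy = 0 then
      (true, (if dx < 0 then PySem.List.max2? valid_positions Prod.fst Prod.snd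
              else PySem.List.min2? valid_positions Prod.fst Prod.snd).getD (0, 0))
    else
      (true, (0, 0))  -- unreachable: valid_positions nonempty forces dy = 0 or dx = 0
  else
    (true, valid_positions.headD (0, 0))  -- valid_positions[0]; list known nonempty here

-- ===== PORT B =====
def fvpNearest (start : Int) (d : Int) (cands : List Int) : Option Int :=
  cands.foldl (fun best c =>
    if decide ((c - start) * d > 0) && best.all (fun b => decide ((c - start) * d < (b - start) * d))
    then some c else best) none

def find_valid_positions_alt (dx : Int) (dy : Int) (start_x : Int) (start_y : Int) (positions : List (Int × Int)) (len_matrix : Int) : Bool × (Int × Int) :=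
  if dx = 0 then
    match fvpNearest start_y dy ((positions.filter (fun p => p.1 = start_x)).map Prod.snd) with
    | none => (false, (start_x, max (len_matrix * dy) 0))
    | some b => (true, (start_x, b))
  else if dy = 0 then
    match fvpNearest start_x dx ((positions.filter (fun p => p.2 = start_y)).map Prod.fst) with
    | none => (false, (max (len_matrix * dx) 0, start_y))
    | some b => (true, (b, start_y))
  else
    (false, (0, 0))  -- Python raises ValueError here (diagonal ray); outside Pre_

-- ===== PRECONDITION & SPEC =====
-- Pre_ excludes exactly the diagonal rays (dx ≠ 0 and dy ≠ 0), on which the Python A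
-- raises NameError (new_x/new_y never assigned); B raises ValueError there.
def Pre_find_valid_positions (dx : Int) (dy : Int) (start_x : Int) (start_y : Int) (positions : List (Int × Int)) (len_matrix : Int) : Prop := dx = 0 ∨ dy = 0
instance (dx : Int) (dy : Int) (start_x : Int) (start_y : Int) (positions : List (Int × Int)) (len_matrix : Int) : Decidable (Pre_find_valid_positions dx dy start_x start_y positions len_matrix) := by unfold Pre_find_valid_positions; infer_instance

def pvWitness_find_valid_positions : Int × Int × Int × Int × (List (Int × Int)) × Int := (1, 0, 0, 2, [(3, 2), (1, 2), (0, 5)], 4)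

def Spec_find_valid_positions (dx : Int) (dy : Int) (start_x : Int) (start_y : Int) (positions : List (Int × Int)) (len_matrix : Int) (out : Bool × (Int × Int)) : Prop := out = find_valid_positions_alt dx dy start_x start_y positions len_matrix
instance (dx : Int) (dy : Int) (start_x : Int) (start_y : Int) (positions : List (Int × Int)) (len_matrix : Int) (out : Bool × (Int × Int)) : Decidable (Spec_find_valid_positions dx dy start_x start_y positions len_matrix out) := by unfold Spec_find_valid_positions; infer_instance

-- ===== CLAIM (what is proved, stated in full; the proofs are below) =====
def Claim_equal_find_valid_positions : Prop := ∀ (dx : Int) (dy : Int) (start_x : Int) (start_y : Int) (positions : List (Int × Int)) (len_matrix : Int), Dom_find_valid_positions dx dy start_x start_y positions len_matrix → Pre_find_valid_positions dx dy start_x start_y positions len_matrix → Spec_find_valid_positions dx dy start_x start_y positions len_matrix (find_valid_positions dx dy start_x start_y positions len_matrix)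

-- ===== LEMMAS AND PROOFS =====

theorem fvp_witness_ok : Dom_find_valid_positions (pvWitness_find_valid_positions.1) (pvWitness_find_valid_positions.2.1) (pvWitness_find_valid_positions.2.2.1) (pvWitness_find_valid_positions.2.2.2.1) (pvWitness_find_valid_positions.2.2.2.2.1) (pvWitness_find_valid_positions.2.2.2.2.2) ∧ Pre_find_valid_positions (pvWitness_find_valid_positions.1) (pvWitness_find_valid_positions.2.1) (pvWitness_find_valid_positions.2.2.1) (pvWitness_find_valid_positions.2.2.2.1) (pvWitness_find_valid_positions.2.2.2.2.1) (pvWitness_find_valid_positions.2.2.2.2.2) := by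
  constructor <;> decide

-- d = 0: no candidate is ever strictly ahead, so the nearest-scan returns its initial state.
theorem fvpNearest_zero (start : Int) (cands : List Int) (b : Option Int) :
    cands.foldl (fun best c =>
      if decide ((c - start) * 0 > 0) && best.all (fun bb => decide ((c - start) * 0 < (bb - start) * 0))
      then some c else best) b = b := by
  induction cands generalizing b with
  | nil => rfl
  | cons c t ih => simpa using ih b

-- the min2?/max2? folds never forget a candidate
theorem fvp_min2fold_ne_none (l : List (Int × Int)) (a : Int × Int) :
    l.foldl (fun acc x =>
      match acc with
      | none => some x
      | some m => if (decide (x.1 < m.1) || !decide (m.1 < x.1) && decide (x.2 < m.2)) = true then some x else some m)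
      (some a) ≠ none := by
  induction l generalizing a with
  | nil => simp
  | cons x t ih =>
    simp only [List.foldl_cons]
    split <;> first | exact ih _ | (split <;> exact ih _)

theorem fvp_max2fold_ne_none (l : List (Int × Int)) (a : Int × Int) :
    l.foldl (fun acc x =>
      match acc with
      | none => some x
      | some m => if (decide (m.1 < x.1) || !decide (x.1 < m.1) && decide (m.2 < x.2)) = true then some x else some m)
      (some a) ≠ none := by
  induction l generalizing a with
  | nil => simp
  | cons x t ih =>
    simp only [List.foldl_cons]
    split <;> first | exact ih _ | (split <;> exact ih _)

-- ===== master lemmas: A's filter + min2?/max2? equals B's running nearest, axis by axis =====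

-- horizontal ray (dy = 0), moving right (dx > 0): min over first components
theorem fvp_master_fst_min (st d k : Int) (hd : 0 < d) (ps : List (Int × Int)) (b : Option Int) :
    (ps.filter (fun p => decide (p.2 = k ∧ (p.1 - st) * d > 0))).foldl (fun acc x =>
        match acc with
        | none => some x
        | some m => if (decide (x.1 < m.1) || !decide (m.1 < x.1) && decide (x.2 < m.2)) = true then some x else some m)
      (b.map (fun c => (c, k)))
    = (((ps.filter (fun p => p.2 = k)).map Prod.fst).foldl (fun best c =>
        if decide ((c - st) * d > 0) && best.all (fun bb => decide ((c - st) * d < (bb - st) * d))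
        then some c else best) b).map (fun c => (c, k)) := by
  induction ps generalizing b with
  | nil => rfl
  | cons p t ih =>
    by_cases h2 : p.2 = k
    · by_cases hp : (p.1 - st) * d > 0
      · have hlt : ∀ bb : Int, ((p.1 - st) * d < (bb - st) * d ↔ p.1 < bb) := by
          intro bb
          rw [Int.mul_lt_mul_right hd]
          omega
        cases b with
        | none =>
          simp only [List.filter_cons, List.map_cons, decide_eq_true_eq, h2, hp, and_self,
            if_true, List.foldl_cons, Option.map_none, Option.all_none, Bool.and_true,
            decide_eq_true hp]
          have hpk : p = (p.1, k) := by cases p; simp_all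
          rw [hpk] at *
          exact ih (some p.1)
        | some bb =>
          simp only [List.filter_cons, List.map_cons, decide_eq_true_eq, h2, hp, and_self,
            if_true, List.foldl_cons, Option.map_some, Option.all_some, decide_eq_true hp,
            Bool.true_and]
          have hpk : p = (p.1, k) := by cases p; simp_all
          rw [hpk]
          by_cases hc : p.1 < bb
          · have : (p.1 - st) * d < (bb - st) * d := (hlt bb).mpr hc
            simp only [decide_eq_true hc, decide_eq_true this, Bool.true_or, if_true]
            exact ih (some p.1)
          · have : ¬ (p.1 - st) * d < (bb - st) * d := fun h => hc ((hlt bb).mp h)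
            simp only [decide_eq_false hc, decide_eq_false this, lt_self_iff_false,
              decide_false, Bool.and_false, Bool.false_or, if_neg, Bool.false_eq_true,
              not_false_eq_true, if_false]
            exact ih (some bb)
      · simp only [List.filter_cons, decide_eq_true_eq, h2, hp, and_false, if_false,
          List.map_cons, List.foldl_cons, decide_eq_false hp, Bool.false_and,
          Bool.false_eq_true, if_false, if_true, true_and]
        exact ih b
    · simp only [List.filter_cons, decide_eq_true_eq, h2, false_and, if_false]
      exact ih b

-- horizontal ray (dy = 0), moving left (dx < 0): max over first components
theorem fvp_master_fst_max (st d k : Int) (hd : d < 0) (ps : List (Int × Int)) (b : Option Int) :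
    (ps.filter (fun p => decide (p.2 = k ∧ (p.1 - st) * d > 0))).foldl (fun acc x =>
        match acc with
        | none => some x
        | some m => if (decide (m.1 < x.1) || !decide (x.1 < m.1) && decide (m.2 < x.2)) = true then some x else some m)
      (b.map (fun c => (c, k)))
    = (((ps.filter (fun p => p.2 = k)).map Prod.fst).foldl (fun best c =>
        if decide ((c - st) * d > 0) && best.all (fun bb => decide ((c - st) * d < (bb - st) * d))
        then some c else best) b).map (fun c => (c, k)) := by
  induction ps generalizing b with
  | nil => rfl
  | cons p t ih =>
    by_cases h2 : p.2 = k
    · by_cases hp : (p.1 - st) * d > 0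
      · have hlt : ∀ bb : Int, ((p.1 - st) * d < (bb - st) * d ↔ bb < p.1) := by
          intro bb
          rw [Int.mul_lt_mul_right_of_neg hd]
          omega
        cases b with
        | none =>
          simp only [List.filter_cons, List.map_cons, decide_eq_true_eq, h2, hp, and_self,
            if_true, List.foldl_cons, Option.map_none, Option.all_none, Bool.and_true,
            decide_eq_true hp]
          have hpk : p = (p.1, k) := by cases p; simp_all
          rw [hpk] at *
          exact ih (some p.1)
        | some bb =>
          simp only [List.filter_cons, List.map_cons, decide_eq_true_eq, h2, hp, and_self,
            if_true, List.foldl_cons, Option.map_some, Option.all_some, decide_eq_true hp,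
            Bool.true_and]
          have hpk : p = (p.1, k) := by cases p; simp_all
          rw [hpk]
          by_cases hc : bb < p.1
          · have : (p.1 - st) * d < (bb - st) * d := (hlt bb).mpr hc
            simp only [decide_eq_true hc, decide_eq_true this, Bool.true_or, if_true]
            exact ih (some p.1)
          · have : ¬ (p.1 - st) * d < (bb - st) * d := fun h => hc ((hlt bb).mp h)
            simp only [decide_eq_false hc, decide_eq_false this, lt_self_iff_false,
              decide_false, Bool.and_false, Bool.false_or, if_neg, Bool.false_eq_true,
              not_false_eq_true, if_false]
            exact ih (some bb)
      · simp only [List.filter_cons, decide_eq_true_eq, h2, hp, and_false, if_false,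
          List.map_cons, List.foldl_cons, decide_eq_false hp, Bool.false_and,
          Bool.false_eq_true, if_false, if_true, true_and]
        exact ih b
    · simp only [List.filter_cons, decide_eq_true_eq, h2, false_and, if_false]
      exact ih b

-- vertical ray (dx = 0), moving down (dy > 0): min over second components
theorem fvp_master_snd_min (st d k : Int) (hd : 0 < d) (ps : List (Int × Int)) (b : Option Int) :
    (ps.filter (fun p => decide (p.1 = k ∧ (p.2 - st) * d > 0))).foldl (fun acc x =>
        match acc with
        | none => some x
        | some m => if (decide (x.1 < m.1) || !decide (m.1 < x.1) && decide (x.2 < m.2)) = true then some x else some m)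
      (b.map (fun c => (k, c)))
    = (((ps.filter (fun p => p.1 = k)).map Prod.snd).foldl (fun best c =>
        if decide ((c - st) * d > 0) && best.all (fun bb => decide ((c - st) * d < (bb - st) * d))
        then some c else best) b).map (fun c => (k, c)) := by
  induction ps generalizing b with
  | nil => rfl
  | cons p t ih =>
    by_cases h1 : p.1 = k
    · by_cases hp : (p.2 - st) * d > 0
      · have hlt : ∀ bb : Int, ((p.2 - st) * d < (bb - st) * d ↔ p.2 < bb) := by
          intro bb
          rw [Int.mul_lt_mul_right hd]
          omega
        cases b with
        | none =>
          simp only [List.filter_cons, List.map_cons, decide_eq_true_eq, h1, hp, and_self,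
            if_true, List.foldl_cons, Option.map_none, Option.all_none, Bool.and_true,
            decide_eq_true hp]
          have hpk : p = (k, p.2) := by cases p; simp_all
          rw [hpk] at *
          exact ih (some p.2)
        | some bb =>
          simp only [List.filter_cons, List.map_cons, decide_eq_true_eq, h1, hp, and_self,
            if_true, List.foldl_cons, Option.map_some, Option.all_some, decide_eq_true hp,
            Bool.true_and]
          have hpk : p = (k, p.2) := by cases p; simp_all
          rw [hpk]
          by_cases hc : p.2 < bb
          · have : (p.2 - st) * d < (bb - st) * d := (hlt bb).mpr hc
            simp only [decide_eq_true hc, decide_eq_true this, lt_self_iff_false,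
              decide_false, Bool.false_or, Bool.not_false, Bool.true_and, if_true]
            exact ih (some p.2)
          · have : ¬ (p.2 - st) * d < (bb - st) * d := fun h => hc ((hlt bb).mp h)
            simp only [decide_eq_false hc, decide_eq_false this, lt_self_iff_false,
              decide_false, Bool.false_or, Bool.not_false, Bool.true_and, Bool.and_false,
              Bool.false_eq_true, if_false]
            exact ih (some bb)
      · simp only [List.filter_cons, decide_eq_true_eq, h1, hp, and_false, if_false,
          List.map_cons, List.foldl_cons, decide_eq_false hp, Bool.false_and,
          Bool.false_eq_true, if_false, if_true, true_and]
        exact ih b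
    · simp only [List.filter_cons, decide_eq_true_eq, h1, false_and, if_false]
      exact ih b

-- vertical ray (dx = 0), moving up (dy < 0): max over second components
theorem fvp_master_snd_max (st d k : Int) (hd : d < 0) (ps : List (Int × Int)) (b : Option Int) :
    (ps.filter (fun p => decide (p.1 = k ∧ (p.2 - st) * d > 0))).foldl (fun acc x =>
        match acc with
        | none => some x
        | some m => if (decide (m.1 < x.1) || !decide (x.1 < m.1) && decide (m.2 < x.2)) = true then some x else some m)
      (b.map (fun c => (k, c)))
    = (((ps.filter (fun p => p.1 = k)).map Prod.snd).foldl (fun best c =>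
        if decide ((c - st) * d > 0) && best.all (fun bb => decide ((c - st) * d < (bb - st) * d))
        then some c else best) b).map (fun c => (k, c)) := by
  induction ps generalizing b with
  | nil => rfl
  | cons p t ih =>
    by_cases h1 : p.1 = k
    · by_cases hp : (p.2 - st) * d > 0
      · have hlt : ∀ bb : Int, ((p.2 - st) * d < (bb - st) * d ↔ bb < p.2) := by
          intro bb
          rw [Int.mul_lt_mul_right_of_neg hd]
          omega
        cases b with
        | none =>
          simp only [List.filter_cons, List.map_cons, decide_eq_true_eq, h1, hp, and_self,
            if_true, List.foldl_cons, Option.map_none, Option.all_none, Bool.and_true,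
            decide_eq_true hp]
          have hpk : p = (k, p.2) := by cases p; simp_all
          rw [hpk] at *
          exact ih (some p.2)
        | some bb =>
          simp only [List.filter_cons, List.map_cons, decide_eq_true_eq, h1, hp, and_self,
            if_true, List.foldl_cons, Option.map_some, Option.all_some, decide_eq_true hp,
            Bool.true_and]
          have hpk : p = (k, p.2) := by cases p; simp_all
          rw [hpk]
          by_cases hc : bb < p.2
          · have : (p.2 - st) * d < (bb - st) * d := (hlt bb).mpr hc
            simp only [decide_eq_true hc, decide_eq_true this, lt_self_iff_false,
              decide_false, Bool.false_or, Bool.not_false, Bool.true_and, if_true]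
            exact ih (some p.2)
          · have : ¬ (p.2 - st) * d < (bb - st) * d := fun h => hc ((hlt bb).mp h)
            simp only [decide_eq_false hc, decide_eq_false this, lt_self_iff_false,
              decide_false, Bool.false_or, Bool.not_false, Bool.true_and, Bool.and_false,
              Bool.false_eq_true, if_false]
            exact ih (some bb)
      · simp only [List.filter_cons, decide_eq_true_eq, h1, hp, and_false, if_false,
          List.map_cons, List.foldl_cons, decide_eq_false hp, Bool.false_and,
          Bool.false_eq_true, if_false, if_true, true_and]
        exact ih b
    · simp only [List.filter_cons, decide_eq_true_eq, h1, false_and, if_false]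
      exact ih b


-- bridge: min2?/max2? with fst/snd keys ARE the explicit folds used in the master lemmas
theorem fvp_min2_eq_fold (l : List (Int × Int)) : PySem.List.min2? l Prod.fst Prod.snd = l.foldl (fun acc x =>
      match acc with
      | none => some x
      | some m => if (decide (x.1 < m.1) || !decide (m.1 < x.1) && decide (x.2 < m.2)) = true then some x else some m)
      none := by
  unfold PySem.List.min2?
  congr 1
  funext acc x
  cases acc <;> rfl

theorem fvp_max2_eq_fold (l : List (Int × Int)) : PySem.List.max2? l Prod.fst Prod.snd = l.foldl (fun acc x =>
      match acc with
      | none => some x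
      | some m => if (decide (m.1 < x.1) || !decide (x.1 < m.1) && decide (m.2 < x.2)) = true then some x else some m)
      none := by
  unfold PySem.List.max2?
  congr 1
  funext acc x
  cases acc <;> rfl

-- the min2?/max2? folds over a nonempty list return an element; selection helpers
theorem fvp_min2fold_none (l : List (Int × Int))
    (h : l.foldl (fun acc x =>
      match acc with
      | none => some x
      | some m => if (decide (x.1 < m.1) || !decide (m.1 < x.1) && decide (x.2 < m.2)) = true then some x else some m)
      none = none) : l = [] := by
  cases l with
  | nil => rfl
  | cons v t => exact absurd h (fvp_min2fold_ne_none t v)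

theorem fvp_max2fold_none (l : List (Int × Int))
    (h : l.foldl (fun acc x =>
      match acc with
      | none => some x
      | some m => if (decide (m.1 < x.1) || !decide (x.1 < m.1) && decide (m.2 < x.2)) = true then some x else some m)
      none = none) : l = [] := by
  cases l with
  | nil => rfl
  | cons v t => exact absurd h (fvp_max2fold_ne_none t v)

theorem fvp_ite_max (a : Int) : (if a > 0 then a else 0) = max a 0 := by
  rw [Int.max_def]; split_ifs <;> omega

-- ===== VERDICT (by name: the statement is the Claim_ definition above) =====
theorem find_valid_positions_spec : Claim_equal_find_valid_positions := by
  intro dx dy sx sy ps lm _ hpre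
  unfold Spec_find_valid_positions find_valid_positions find_valid_positions_alt
  by_cases hdx : dx = 0
  · subst hdx
    simp only [if_pos rfl]
    by_cases hdy : dy = 0
    · subst hdy
      simp only [if_pos rfl, mul_zero, lt_self_iff_false, if_false, zero_lt_one,
        gt_iff_lt, lt_irrefl]
      have hz := fvpNearest_zero sy ((ps.filter (fun p => p.1 = sx)).map Prod.snd) none
      simp only [fvpNearest, hz]
      have hloop : ps.foldl (fun acc p =>
          if (0 : Int) = 0 then
            (if p.2 = sy ∧ (p.1 - sx) * 0 > 0 then acc ++ [p] else acc)
          else if (0 : Int) = 0 then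
            (if p.1 = sx ∧ (p.2 - sy) * 0 > 0 then acc ++ [p] else acc)
          else acc) [] = ([] : List (Int × Int)) := by
        induction ps with
        | nil => rfl
        | cons p t ih => simpa using ih
      simp [hloop]
    · -- dx = 0, dy ≠ 0
      simp only [if_neg hdy, if_pos rfl, eq_self_iff_true, if_true]
      rw [PySem.List.foldl_append_ite_eq_filter, List.nil_append]
      set V := ps.filter (fun p => decide (p.1 = sx ∧ (p.2 - sy) * dy > 0)) with hV
      rcases lt_or_gt_of_ne hdy with hneg | hpos
      · -- dy < 0 : max
        have hm := fvp_master_snd_max sy dy sx hneg ps none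
        simp only [Option.map_none] at hm
        rw [← hV] at hm
        simp only [fvpNearest]
        cases h : ((ps.filter (fun p => p.1 = sx)).map Prod.snd).foldl (fun best c =>
            if decide ((c - sy) * dy > 0) && best.all (fun bb => decide ((c - sy) * dy < (bb - sy) * dy))
            then some c else best) none with
        | none =>
          rw [h, Option.map_none] at hm
          have hVnil : V = [] := fvp_max2fold_none V hm
          simp [hVnil, fvp_ite_max]
        | some c =>
          rw [h, Option.map_some] at hm
          have hVne : V ≠ [] := by
            intro hn; rw [hn] at hm; simp at hm
          simp only [if_neg hVne, if_pos rfl, if_pos hneg]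
          cases hVc : V with
          | nil => exact absurd hVc hVne
          | cons v0 t =>
            cases t with
            | nil =>
              rw [hVc] at hm
              simp at hm
              simp [hVc, hm]
            | cons v1 t1 =>
              rw [hVc] at hm
              have hlen : (v0 :: v1 :: t1).length > 1 := by simp
              have hmm : PySem.List.max2? (v0 :: v1 :: t1) Prod.fst Prod.snd = some (sx, c) := (fvp_max2_eq_fold _).trans hm
              simp only [if_pos hlen, hmm, Option.getD_some]
      · -- dy > 0 : min
        have hm := fvp_master_snd_min sy dy sx hpos ps none
        simp only [Option.map_none] at hm
        rw [← hV] at hm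
        simp only [fvpNearest]
        cases h : ((ps.filter (fun p => p.1 = sx)).map Prod.snd).foldl (fun best c =>
            if decide ((c - sy) * dy > 0) && best.all (fun bb => decide ((c - sy) * dy < (bb - sy) * dy))
            then some c else best) none with
        | none =>
          rw [h, Option.map_none] at hm
          have hVnil : V = [] := fvp_min2fold_none V hm
          simp [hVnil, fvp_ite_max]
        | some c =>
          rw [h, Option.map_some] at hm
          have hVne : V ≠ [] := by
            intro hn; rw [hn] at hm; simp at hm
          have hdy' : ¬ dy < 0 := by omega
          simp only [if_neg hVne, if_pos rfl, if_neg hdy']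
          cases hVc : V with
          | nil => exact absurd hVc hVne
          | cons v0 t =>
            cases t with
            | nil =>
              rw [hVc] at hm
              simp at hm
              simp [hVc, hm]
            | cons v1 t1 =>
              rw [hVc] at hm
              have hlen : (v0 :: v1 :: t1).length > 1 := by simp
              have hmm : PySem.List.min2? (v0 :: v1 :: t1) Prod.fst Prod.snd = some (sx, c) := (fvp_min2_eq_fold _).trans hm
              simp only [if_pos hlen, hmm, Option.getD_some]
  · -- dx ≠ 0, so dy = 0 by Pre_
    have hdy : dy = 0 := hpre.resolve_left hdx
    subst hdy
    simp only [if_pos rfl, if_neg hdx, eq_self_iff_true, if_true]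
    rw [PySem.List.foldl_append_ite_eq_filter, List.nil_append]
    set V := ps.filter (fun p => decide (p.2 = sy ∧ (p.1 - sx) * dx > 0)) with hV
    rcases lt_or_gt_of_ne hdx with hneg | hpos
    · -- dx < 0 : max
      have hm := fvp_master_fst_max sx dx sy hneg ps none
      simp only [Option.map_none] at hm
      rw [← hV] at hm
      simp only [fvpNearest]
      cases h : ((ps.filter (fun p => p.2 = sy)).map Prod.fst).foldl (fun best c =>
          if decide ((c - sx) * dx > 0) && best.all (fun bb => decide ((c - sx) * dx < (bb - sx) * dx))
          then some c else best) none with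
      | none =>
        rw [h, Option.map_none] at hm
        have hVnil : V = [] := fvp_max2fold_none V hm
        simp [hVnil, hdx, fvp_ite_max]
      | some c =>
        rw [h, Option.map_some] at hm
        have hVne : V ≠ [] := by
          intro hn; rw [hn] at hm; simp at hm
        simp only [if_neg hVne, if_neg hdx, if_pos rfl, if_pos hneg]
        cases hVc : V with
        | nil => exact absurd hVc hVne
        | cons v0 t =>
          cases t with
          | nil =>
            rw [hVc] at hm
            simp at hm
            simp [hVc, hm]
          | cons v1 t1 =>
            rw [hVc] at hm
            have hlen : (v0 :: v1 :: t1).length > 1 := by simp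
            have hmm : PySem.List.max2? (v0 :: v1 :: t1) Prod.fst Prod.snd = some (c, sy) := (fvp_max2_eq_fold _).trans hm
            simp only [if_pos hlen, hmm, Option.getD_some]
    · -- dx > 0 : min
      have hm := fvp_master_fst_min sx dx sy hpos ps none
      simp only [Option.map_none] at hm
      rw [← hV] at hm
      simp only [fvpNearest]
      cases h : ((ps.filter (fun p => p.2 = sy)).map Prod.fst).foldl (fun best c =>
          if decide ((c - sx) * dx > 0) && best.all (fun bb => decide ((c - sx) * dx < (bb - sx) * dx))
          then some c else best) none with
      | none =>
        rw [h, Option.map_none] at hm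
        have hVnil : V = [] := fvp_min2fold_none V hm
        simp [hVnil, hdx, fvp_ite_max]
      | some c =>
        rw [h, Option.map_some] at hm
        have hVne : V ≠ [] := by
          intro hn; rw [hn] at hm; simp at hm
        have hdx' : ¬ dx < 0 := by omega
        simp only [if_neg hVne, if_neg hdx, if_pos rfl, if_neg hdx']
        cases hVc : V with
        | nil => exact absurd hVc hVne
        | cons v0 t =>
          cases t with
          | nil =>
            rw [hVc] at hm
            simp at hm
            simp [hVc, hm]
          | cons v1 t1 =>
            rw [hVc] at hm
            have hlen : (v0 :: v1 :: t1).length > 1 := by simp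
            have hmm : PySem.List.min2? (v0 :: v1 :: t1) Prod.fst Prod.snd = some (c, sy) := (fvp_min2_eq_fold _).trans hm
            simp only [if_pos hlen, hmm, Option.getD_some]
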